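-- pv_equiv track=rewrite | github.com/Pashweetie/NIST_RBAC | roles.py | matrixControls
-- ===== SOURCE A (Python) =====
-- def matrixControls(roles, matrix):
--   for descendant in roles:
--     if "control" not in matrix[descendant][descendant]:
--       matrix[descendant][descendant].append("control")
--     for ascendant in roles[descendant]:
--       if "control" not in matrix[ascendant][ascendant]:
--         matrix[ascendant][ascendant].append("control")
--   return matrix
-- ===== SOURCE B (Python) =====
-- def matrixControls(roles, matrix):
--     # Phase 1: gather every node to mark (role keys plus all ascendant lists).
--     # Phase 2: find which of their diagonal cells still lack "control" (this
--     # indexes exactly the diagonals A indexes, so it raises KeyError on the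
--     # same inputs).  Phase 3: rebuild the matrix in one comprehension,
--     # extending exactly those diagonals.  Returns a new dict (A mutates
--     # `matrix` in place); the returned value is the same.
--     nodes = set(roles)
--     for ascendants in roles.values():
--         nodes.update(ascendants)
--     to_mark = {node for node in nodes if "control" not in matrix[node][node]}
--     return {key: ({cell: (vals + ["control"] if cell == key else vals)
--                    for cell, vals in row.items()} if key in to_mark else row)
--             for key, row in matrix.items()}
-- ===== Notes on version B (the rewrite author's own statement) =====
-- stated objective: alternative
-- what changed: A marks diagonal cells imperatively inside an interleaved nested descendant/ascendant loop over the roles dict; B first gathers the complete node set (role keys plus all ascendant lists) and then rebuilds the matrix in a single comprehension over matrix.items(), extending exactly the gathered diagonals that still lack "control", without mutating the input.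
import Mathlib
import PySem

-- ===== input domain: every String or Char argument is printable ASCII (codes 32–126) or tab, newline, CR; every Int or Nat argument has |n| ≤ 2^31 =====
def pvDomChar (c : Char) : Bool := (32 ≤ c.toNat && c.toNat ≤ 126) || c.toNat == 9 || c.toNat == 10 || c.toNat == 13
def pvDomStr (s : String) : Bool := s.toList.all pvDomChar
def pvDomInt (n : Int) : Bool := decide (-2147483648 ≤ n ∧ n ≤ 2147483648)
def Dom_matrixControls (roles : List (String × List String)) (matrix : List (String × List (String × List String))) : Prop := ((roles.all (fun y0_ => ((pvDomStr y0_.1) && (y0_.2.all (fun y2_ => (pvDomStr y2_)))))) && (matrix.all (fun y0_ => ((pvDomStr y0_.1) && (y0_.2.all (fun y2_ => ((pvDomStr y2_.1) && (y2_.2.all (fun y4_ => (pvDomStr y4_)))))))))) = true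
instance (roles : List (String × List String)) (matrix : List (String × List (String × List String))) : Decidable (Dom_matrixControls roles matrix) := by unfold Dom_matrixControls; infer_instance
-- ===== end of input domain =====

-- B replaces A's interleaved nested marking loop (mutating matrix in place) by gather-the-node-set,
-- find-the-diagonals-still-unmarked, then rebuild-the-matrix-in-one-comprehension; equivalence is
-- about the RETURNED value (A mutates its matrix argument in place, B builds a new one).


-- ===== PORT A =====
-- the marking step  "if 'control' not in matrix[node][node]: matrix[node][node].append('control')":
-- `none` from a lookup (Python: KeyError, excluded by Pre_) and "control already present" both leave
-- the matrix unchanged.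
def pvRowMark (row : List (String × List String)) (node : String) : Option (List (String × List String)) :=
  match (PySem.Dict.mk row).get? node with
  | none => none
  | some cell => if "control" ∈ cell then none
                 else some ((PySem.Dict.mk row).insert node (cell ++ ["control"])).items

def pvMark (m : PySem.Dict String (List (String × List String))) (node : String) :
    PySem.Dict String (List (String × List String)) :=
  match m.get? node with
  | none => m          -- Python: KeyError, excluded by Pre_
  | some row =>
    match pvRowMark row node with
    | none => m
    | some row' => m.insert node row'

-- A: for each descendant mark its diagonal, then immediately mark every ascendant's diagonal.
def matrixControls (roles : List (String × List String)) (matrix : List (String × List (String × List String))) : List (String × List (String × List String)) :=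
  (roles.foldl
    (fun m p =>
      ((PySem.Dict.get? (PySem.Dict.mk roles) p.1).getD []).foldl pvMark (pvMark m p.1))
    (PySem.Dict.mk matrix)).items

-- ===== PORT B =====
-- B: gather the node set (role keys, then every ascendant list), find which of their diagonal
-- cells still lack "control", then rebuild the matrix in one comprehension.
def pvRebuildRow (key : String) (row : List (String × List String)) : List (String × List String) :=
  row.map (fun cv => (cv.1, if cv.1 = key then cv.2 ++ ["control"] else cv.2))

def matrixControls_alt (roles : List (String × List String)) (matrix : List (String × List (String × List String))) : List (String × List (String × List String)) :=
  let nodes : PySem.Set String :=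
    (PySem.Dict.mk roles).values.foldl (fun s ascendants => PySem.Set.update s ascendants)
      (PySem.Set.ofList (PySem.Dict.mk roles).keys)
  let toMark : PySem.Set String :=
    nodes.filter (fun node =>
      !decide ("control" ∈ (PySem.Dict.mk ((PySem.Dict.mk matrix).getD node [])).getD node []))
      -- Python raises KeyError on a missing row/diagonal (excluded by Pre_); the port reads [] there
  (PySem.Dict.mk matrix).items.map (fun kr =>
    (kr.1, if PySem.Set.contains toMark kr.1 then pvRebuildRow kr.1 kr.2 else kr.2))

-- ===== PRECONDITION & SPEC =====
def pvHasCell (matrix : List (String × List (String × List String))) (node : String) : Bool :=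
  match (PySem.Dict.mk matrix).get? node with
  | none => false
  | some row => ((PySem.Dict.mk row).get? node).isSome

-- Pre_ excludes (a) exactly the inputs on which Python A raises KeyError: some visited node (a role
-- key or one of its listed ascendants) has no matrix row or no diagonal entry in its row; and
-- (b) association lists with duplicate keys (in roles, in matrix, or inside a row), which encode no
-- Python dict at all — both Pythons only ever receive dicts, whose keys are unique.
def Pre_matrixControls (roles : List (String × List String)) (matrix : List (String × List (String × List String))) : Prop :=
  (roles.map Prod.fst).Nodup ∧ (matrix.map Prod.fst).Nodup ∧
  (∀ kr ∈ matrix, (kr.2.map Prod.fst).Nodup) ∧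
  ∀ p ∈ roles, pvHasCell matrix p.1 = true ∧ ∀ a ∈ p.2, pvHasCell matrix a = true

instance (roles : List (String × List String)) (matrix : List (String × List (String × List String))) : Decidable (Pre_matrixControls roles matrix) := by unfold Pre_matrixControls; infer_instance

def pvWitness_matrixControls : (List (String × List String)) × (List (String × List (String × List String))) :=
  ([("a", ["b"])], [("a", [("a", [])]), ("b", [("b", ["control"])])])

def Spec_matrixControls (roles : List (String × List String)) (matrix : List (String × List (String × List String))) (out : List (String × List (String × List String))) : Prop := out = matrixControls_alt roles matrix
instance (roles : List (String × List String)) (matrix : List (String × List (String × List String))) (out : List (String × List (String × List String))) : Decidable (Spec_matrixControls roles matrix out) := by unfold Spec_matrixControls; infer_instance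

-- ===== CLAIM (what is proved, stated in full; the proofs are below) =====
def Claim_equal_matrixControls : Prop := ∀ (roles : List (String × List String)) (matrix : List (String × List (String × List String))), Dom_matrixControls roles matrix → Pre_matrixControls roles matrix → Spec_matrixControls roles matrix (matrixControls roles matrix)

-- ===== LEMMAS AND PROOFS =====

-- proof-side guarded marking map: A's per-node effect on one row, as a map
def pvMarkCell (key : String) (cell : String) (vals : List String) : List String :=
  if cell = key ∧ "control" ∉ vals then vals ++ ["control"] else vals

def pvRowMap (key : String) (row : List (String × List String)) : List (String × List String) :=
  row.map (fun cv => (cv.1, pvMarkCell key cv.1 cv.2))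


-- the two interleaved loops of A flatten to one fold over the sequence key₁, asc₁₁, …, key₂, asc₂₁, …
theorem pvFoldl_flat {α β σ : Type} (f : β → σ → β) (key : α → σ) (g : α → List σ) :
    ∀ (l : List α) (init : β),
      l.foldl (fun m x => (g x).foldl f (f m (key x))) init
        = (l.flatMap (fun x => key x :: g x)).foldl f init := by
  intro l
  induction l with
  | nil => intro init; rfl
  | cons x t ih => intro init; simp [List.foldl_append, ih]

-- evaluation shapes of pvMark
theorem pvMark_none (m : PySem.Dict String (List (String × List String))) (a : String)
    (h : m.get? a = none) : pvMark m a = m := by simp [pvMark, h]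

theorem pvMark_skip (m : PySem.Dict String (List (String × List String))) (a : String)
    (row : List (String × List String)) (h : m.get? a = some row)
    (h2 : pvRowMark row a = none) : pvMark m a = m := by simp [pvMark, h, h2]

theorem pvMark_ins (m : PySem.Dict String (List (String × List String))) (a : String)
    (row r' : List (String × List String)) (h : m.get? a = some row)
    (h2 : pvRowMark row a = some r') : pvMark m a = m.insert a r' := by simp [pvMark, h, h2]

-- in a Nodup-keyed association list the entry at a looked-up key is unique
theorem pvVal_unique {ν : Type} (l : List (String × ν)) (a : String) (v : ν)
    (hnd : (l.map Prod.fst).Nodup) (h : (PySem.Dict.mk l).get? a = some v)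
    (cv : String × ν) (hcv : cv ∈ l) (hk : cv.1 = a) : cv.2 = v := by
  have h2 : (PySem.Dict.mk l).get? cv.1 = some cv.2 :=
    PySem.Dict.get?_of_mem_items (d := PySem.Dict.mk l) (by exact hcv) hnd
  rw [hk, h] at h2
  exact (Option.some.inj h2).symm

-- row-level facts about B's comprehension
theorem pvRowMap_none (row : List (String × List String)) (a : String)
    (h : (PySem.Dict.mk row).get? a = none) : pvRowMap a row = row := by
  have hnk : a ∉ row.map Prod.fst := by
    intro hmem
    rw [PySem.Dict.get?_eq_none_iff_not_mem_keys] at h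
    exact h hmem
  unfold pvRowMap
  conv_rhs => rw [← List.map_id row]
  apply List.map_congr_left
  intro cv hcv
  have : cv.1 ≠ a := fun he => hnk (he ▸ List.mem_map_of_mem hcv)
  simp [pvMarkCell, this]

theorem pvRowMap_skip (row : List (String × List String)) (a : String)
    (cell : List String) (hnd : (row.map Prod.fst).Nodup)
    (h : (PySem.Dict.mk row).get? a = some cell) (hc : "control" ∈ cell) :
    pvRowMap a row = row := by
  unfold pvRowMap
  conv_rhs => rw [← List.map_id row]
  apply List.map_congr_left
  intro cv hcv
  by_cases hk : cv.1 = a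
  · have hv := pvVal_unique row a cell hnd h cv hcv hk
    have hc2 : "control" ∈ cv.2 := by rw [hv]; exact hc
    simp [pvMarkCell, hc2]
  · simp [pvMarkCell, hk]

theorem pvRowMap_mark (row : List (String × List String)) (a : String)
    (cell : List String) (hnd : (row.map Prod.fst).Nodup)
    (h : (PySem.Dict.mk row).get? a = some cell) (hc : "control" ∉ cell) :
    pvRowMap a row = row.map (fun p => if p.1 == a then (a, cell ++ ["control"]) else p) := by
  unfold pvRowMap
  apply List.map_congr_left
  intro cv hcv
  by_cases hk : cv.1 = a
  · have := pvVal_unique row a cell hnd h cv hcv hk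
    simp [pvMarkCell, hk, this, hc]
  · simp [pvMarkCell, hk]

theorem pvRebuildRow_none (row : List (String × List String)) (a : String)
    (h : (PySem.Dict.mk row).get? a = none) : pvRebuildRow a row = row := by
  have hnk : a ∉ row.map Prod.fst := by
    intro hmem
    rw [PySem.Dict.get?_eq_none_iff_not_mem_keys] at h
    exact h hmem
  unfold pvRebuildRow
  conv_rhs => rw [← List.map_id row]
  apply List.map_congr_left
  intro cv hcv
  have : cv.1 ≠ a := fun he => hnk (he ▸ List.mem_map_of_mem hcv)
  simp [this]

theorem pvRebuildRow_mark (row : List (String × List String)) (a : String)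
    (cell : List String) (hnd : (row.map Prod.fst).Nodup)
    (h : (PySem.Dict.mk row).get? a = some cell) :
    pvRebuildRow a row = row.map (fun p => if p.1 == a then (a, cell ++ ["control"]) else p) := by
  unfold pvRebuildRow
  apply List.map_congr_left
  intro cv hcv
  by_cases hk : cv.1 = a
  · have := pvVal_unique row a cell hnd h cv hcv hk
    simp [hk, this]
  · simp [hk]

theorem pvRowMap_idem (row : List (String × List String)) (a : String) (cell : List String) :
    pvRowMap a (row.map (fun p => if p.1 == a then (a, cell ++ ["control"]) else p))
      = row.map (fun p => if p.1 == a then (a, cell ++ ["control"]) else p) := by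
  unfold pvRowMap
  rw [List.map_map]
  apply List.map_congr_left
  intro cv _
  by_cases hk : cv.1 = a
  · simp [hk, pvMarkCell]
  · simp [hk, pvMarkCell]

-- pvMark preserves the key list and the row-Nodup invariant
theorem pvMark_keys (m : PySem.Dict String (List (String × List String))) (a : String) :
    (pvMark m a).keys = m.keys := by
  cases hg : m.get? a with
  | none => rw [pvMark_none m a hg]
  | some row =>
    cases hr : pvRowMark row a with
    | none => rw [pvMark_skip m a row hg hr]
    | some row' =>
      rw [pvMark_ins m a row row' hg hr]
      apply PySem.Dict.keys_insert_of_contains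
      rw [PySem.Dict.contains_eq_isSome_get?, hg]
      rfl

theorem pvRowMark_keys (row row' : List (String × List String)) (a : String)
    (h : pvRowMark row a = some row') : row'.map Prod.fst = row.map Prod.fst := by
  cases hg : (PySem.Dict.mk row).get? a with
  | none => simp [pvRowMark, hg] at h
  | some cell =>
    by_cases hc : "control" ∈ cell
    · simp [pvRowMark, hg, hc] at h
    · have hrow' : row' = ((PySem.Dict.mk row).insert a (cell ++ ["control"])).items := by
        simp [pvRowMark, hg, hc] at h; exact h.symm
      have hcont : (PySem.Dict.mk row).contains a = true := by
        rw [PySem.Dict.contains_eq_isSome_get?, hg]; rfl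
      rw [hrow', PySem.Dict.items_insert_of_contains _ _ hcont]
      rw [List.map_map]
      apply List.map_congr_left
      intro p _
      by_cases hk : p.1 = a
      · simp [hk]
      · simp [hk]

theorem pvMark_rows (m : PySem.Dict String (List (String × List String))) (a : String)
    (hr : ∀ r ∈ m.values, (r.map Prod.fst).Nodup) :
    ∀ r ∈ (pvMark m a).values, (r.map Prod.fst).Nodup := by
  cases hg : m.get? a with
  | none => rw [pvMark_none m a hg]; exact hr
  | some row =>
    cases hrm : pvRowMark row a with
    | none => rw [pvMark_skip m a row hg hrm]; exact hr
    | some row' =>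
      rw [pvMark_ins m a row row' hg hrm]
      intro r hrv
      rcases PySem.Dict.mem_values_insert m a row' r hrv with he | hm
      · have hrow : row ∈ m.values := by
          have : (a, row) ∈ m.items := PySem.Dict.mem_items_of_get?_eq_some m hg
          exact List.mem_map_of_mem this
        rw [he, pvRowMark_keys row row' a hrm]
        exact hr row hrow
      · exact hr r hm

-- MAIN LEMMA: folding A's marking step over any node sequence equals B's one-pass map,
-- with "was this key visited?" as the branch condition.
theorem pvFold_eq_map :
    ∀ (ns : List String) (m : PySem.Dict String (List (String × List String))),
      m.keys.Nodup → (∀ r ∈ m.values, (r.map Prod.fst).Nodup) →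
      (ns.foldl pvMark m).items
        = m.items.map (fun kr => (kr.1, if kr.1 ∈ ns then pvRowMap kr.1 kr.2 else kr.2)) := by
  intro ns
  induction ns with
  | nil =>
    intro m _ _
    simp
  | cons a t ih =>
    intro m hk hr
    simp only [List.foldl_cons]
    rw [ih (pvMark m a) (by rw [pvMark_keys]; exact hk) (pvMark_rows m a hr)]
    have hval : ∀ kr ∈ m.items, ∀ row, m.get? a = some row → kr.1 = a → kr.2 = row := by
      intro kr hkr row hg hka
      exact pvVal_unique m.items a row hk (by exact hg) kr hkr hka
    have hrownd : ∀ kr ∈ m.items, (kr.2.map Prod.fst).Nodup := by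
      intro kr hkr
      exact hr kr.2 (List.mem_map_of_mem hkr)
    cases hg : m.get? a with
    | none =>
      rw [pvMark_none m a hg]
      apply List.map_congr_left
      intro kr hkr
      have hka : kr.1 ≠ a := by
        intro he
        rw [PySem.Dict.get?_eq_none_iff_not_mem_keys] at hg
        exact hg (he ▸ PySem.Dict.mem_keys_of_mem_items m hkr)
      simp [hka]
    | some row =>
      cases hrm : pvRowMark row a with
      | none =>
        rw [pvMark_skip m a row hg hrm]
        apply List.map_congr_left
        intro kr hkr
        by_cases hka : kr.1 = a
        · have hkr2 := hval kr hkr row hg hka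
          have hnd2 : (row.map Prod.fst).Nodup := by rw [← hkr2]; exact hrownd kr hkr
          have hrow : pvRowMap a row = row := by
            cases hgc : (PySem.Dict.mk row).get? a with
            | none => exact pvRowMap_none row a hgc
            | some cell =>
              by_cases hc : "control" ∈ cell
              · exact pvRowMap_skip row a cell hnd2 hgc hc
              · simp [pvRowMark, hgc, hc] at hrm
          simp [hka, hkr2, hrow]
        · simp [hka]
      | some row' =>
        rw [pvMark_ins m a row row' hg hrm]
        have hcont : m.contains a = true := by
          rw [PySem.Dict.contains_eq_isSome_get?, hg]; rfl
        rw [PySem.Dict.items_insert_of_contains _ _ hcont, List.map_map]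
        obtain ⟨cell, hgc⟩ : ∃ c, (PySem.Dict.mk row).get? a = some c := by
          cases hgc : (PySem.Dict.mk row).get? a with
          | none => simp [pvRowMark, hgc] at hrm
          | some c => exact ⟨c, rfl⟩
        by_cases hc : "control" ∈ cell
        · exfalso; simp [pvRowMark, hgc, hc] at hrm
        have hrow' : row' = row.map (fun p => if p.1 == a then (a, cell ++ ["control"]) else p) := by
          have hcont2 : (PySem.Dict.mk row).contains a = true := by
            rw [PySem.Dict.contains_eq_isSome_get?, hgc]; rfl
          have h5 : row' = ((PySem.Dict.mk row).insert a (cell ++ ["control"])).items := by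
            simp [pvRowMark, hgc, hc] at hrm; exact hrm.symm
          rw [h5, PySem.Dict.items_insert_of_contains _ _ hcont2]
        apply List.map_congr_left
        intro kr hkr
        by_cases hka : kr.1 = a
        · have hkr2 := hval kr hkr row hg hka
          have hnd2 : (row.map Prod.fst).Nodup := by rw [← hkr2]; exact hrownd kr hkr
          have hmark := pvRowMap_mark row a cell hnd2 hgc hc
          simp [hka, hkr2, hrow', hmark]
          intro _
          simpa using pvRowMap_idem row a cell
        · simp [hka]

-- membership in B's gathered node set
theorem pvMem_foldl_update (y : String) :
    ∀ (l : List (List String)) (s : PySem.Set String),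
      (y ∈ l.foldl (fun s xs => PySem.Set.update s xs) s) ↔ y ∈ s ∨ ∃ xs ∈ l, y ∈ xs := by
  intro l
  induction l with
  | nil => intro s; simp
  | cons xs t ih =>
    intro s
    rw [List.foldl_cons, ih, PySem.Set.mem_update]
    constructor
    · rintro (⟨h | h⟩ | ⟨ys, hys, hy⟩)
      · exact Or.inl h
      · exact Or.inr ⟨xs, List.mem_cons_self, h⟩
      · exact Or.inr ⟨ys, List.mem_cons_of_mem _ hys, hy⟩
    · rintro (h | ⟨ys, hys, hy⟩)
      · exact Or.inl (Or.inl h)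
      · rcases List.mem_cons.mp hys with he | ht
        · exact Or.inl (Or.inr (he ▸ hy))
        · exact Or.inr ⟨ys, ht, hy⟩

-- ===== VERDICT (by name: the statement is the Claim_ definition above) =====
theorem matrixControls_spec : Claim_equal_matrixControls := by
  intro roles matrix _ hpre
  obtain ⟨hrn, hmn, hrow, _⟩ := hpre
  unfold Spec_matrixControls matrixControls matrixControls_alt
  rw [pvFoldl_flat pvMark Prod.fst
        (fun p => (PySem.Dict.get? (PySem.Dict.mk roles) p.1).getD []) roles (PySem.Dict.mk matrix)]
  rw [pvFold_eq_map _ (PySem.Dict.mk matrix) hmn (by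
        intro r hrv
        rcases List.mem_map.mp hrv with ⟨kr, hkr, he⟩
        exact he ▸ hrow kr hkr)]
  apply List.map_congr_left
  intro kr hkr
  have hget : (PySem.Dict.mk matrix).get? kr.1 = some kr.2 :=
    PySem.Dict.get?_of_mem_items (d := PySem.Dict.mk matrix) (by exact hkr) hmn
  have hnd2 : (kr.2.map Prod.fst).Nodup := hrow kr hkr
  have hgetD : (PySem.Dict.mk matrix).getD kr.1 [] = kr.2 := by
    rw [PySem.Dict.getD_eq_get?_getD, hget]; rfl
  -- the visited-node sequence and B's gathered set have the same members
  have hmem : (kr.1 ∈ roles.flatMap (fun p => p.1 :: (PySem.Dict.get? (PySem.Dict.mk roles) p.1).getD []))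
      ↔ (kr.1 ∈ ((PySem.Dict.mk roles).values.foldl (fun s ascendants => PySem.Set.update s ascendants)
            (PySem.Set.ofList (PySem.Dict.mk roles).keys))) := by
    rw [pvMem_foldl_update, PySem.Set.mem_ofList, List.mem_flatMap]
    constructor
    · rintro ⟨p, hp, hin⟩
      rcases List.mem_cons.mp hin with he | ha
      · exact Or.inl (he ▸ List.mem_map_of_mem hp)
      · have hlk : (PySem.Dict.mk roles).get? p.1 = some p.2 :=
          PySem.Dict.get?_of_mem_items (d := PySem.Dict.mk roles) (by exact hp) hrn
        rw [hlk] at ha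
        exact Or.inr ⟨p.2, List.mem_map_of_mem hp, ha⟩
    · rintro (h | ⟨xs, hxs, hy⟩)
      · rcases List.mem_map.mp h with ⟨p, hp, he⟩
        exact ⟨p, hp, List.mem_cons.mpr (Or.inl he.symm)⟩
      · rcases List.mem_map.mp hxs with ⟨p, hp, he⟩
        refine ⟨p, hp, List.mem_cons.mpr (Or.inr ?_)⟩
        have hlk : (PySem.Dict.mk roles).get? p.1 = some p.2 :=
          PySem.Dict.get?_of_mem_items (d := PySem.Dict.mk roles) (by exact hp) hrn
        rw [hlk]
        exact he ▸ hy
  split_ifs with h1 h2 h2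
  · -- A marked this key; B's to-mark set contains it: its diagonal lacks "control"
    cases hgc : (PySem.Dict.mk kr.2).get? kr.1 with
    | none => rw [pvRowMap_none kr.2 kr.1 hgc, pvRebuildRow_none kr.2 kr.1 hgc]
    | some cell =>
      by_cases hc : "control" ∈ cell
      · exfalso
        have h3 := List.mem_filter.mp ((PySem.Set.contains_iff _ _).mp h2)
        have h4 := h3.2
        rw [hgetD] at h4
        have h5 : (PySem.Dict.mk kr.2).getD kr.1 [] = cell := by
          rw [PySem.Dict.getD_eq_get?_getD, hgc]; rfl
        rw [h5] at h4
        simp [hc] at h4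
      · rw [pvRowMap_mark kr.2 kr.1 cell hnd2 hgc hc, pvRebuildRow_mark kr.2 kr.1 cell hnd2 hgc]
  · -- A marked this key but B's to-mark set skips it: "control" is already on the diagonal
    have hn : kr.1 ∈ ((PySem.Dict.mk roles).values.foldl (fun s ascendants => PySem.Set.update s ascendants)
        (PySem.Set.ofList (PySem.Dict.mk roles).keys)) := hmem.mp h1
    have hcondf : ¬ ((fun node =>
        !decide ("control" ∈ (PySem.Dict.mk ((PySem.Dict.mk matrix).getD node [])).getD node [])) kr.1 = true) := by
      intro hcond
      exact h2 ((PySem.Set.contains_iff _ _).mpr (List.mem_filter.mpr ⟨hn, hcond⟩))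
    simp only [hgetD, Bool.not_eq_true', Bool.not_eq_false] at hcondf
    have hc : "control" ∈ (PySem.Dict.mk kr.2).getD kr.1 [] := of_decide_eq_true hcondf
    cases hgc : (PySem.Dict.mk kr.2).get? kr.1 with
    | none =>
      rw [PySem.Dict.getD_eq_get?_getD, hgc] at hc
      simp at hc
    | some cell =>
      have h5 : (PySem.Dict.mk kr.2).getD kr.1 [] = cell := by
        rw [PySem.Dict.getD_eq_get?_getD, hgc]; rfl
      rw [h5] at hc
      rw [pvRowMap_skip kr.2 kr.1 cell hnd2 hgc hc]
  · -- B's to-mark set contains a key A never visits: impossible (to-mark ⊆ gathered nodes)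
    exfalso
    exact h1 (hmem.mpr (List.mem_of_mem_filter ((PySem.Set.contains_iff _ _).mp h2)))
  · rfl
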